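-- pv_equiv track=rewrite | github.com/Sekharsantosh/codemind-python | happy_number.py | happy
-- ===== SOURCE A (Python) =====
-- def happy(n):
--     s=0
--     while(n):
--         r=n%10
--         s=s+r**2
--         n=n//10
--     if s<9:
--         return s
--     else:
--         return happy(s)
-- ===== SOURCE B (Python) =====
-- def happy(n):
--     s = 0
--     while True:
--         if n:
--             s += (n % 10) ** 2
--             n //= 10
--         elif s < 9:
--             return s
--         else:
--             n, s = s, 0
-- ===== Notes on version B (the rewrite author's own statement) =====
-- stated objective: alternative
-- what changed: A's nested structure (an inner digit loop plus an outer tail recursion) is flattened into a single non-nested state-machine loop over (n, s) that either consumes one digit, returns, or restarts the round with n, s = s, 0.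
import Mathlib
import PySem

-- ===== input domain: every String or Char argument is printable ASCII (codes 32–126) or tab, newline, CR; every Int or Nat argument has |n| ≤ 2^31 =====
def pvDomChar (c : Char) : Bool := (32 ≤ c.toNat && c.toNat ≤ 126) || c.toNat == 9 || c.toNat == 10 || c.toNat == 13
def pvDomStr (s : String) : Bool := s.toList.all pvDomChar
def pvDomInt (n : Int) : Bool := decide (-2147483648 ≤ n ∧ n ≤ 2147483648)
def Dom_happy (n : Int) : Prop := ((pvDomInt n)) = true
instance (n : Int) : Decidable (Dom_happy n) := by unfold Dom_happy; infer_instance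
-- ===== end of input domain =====

-- B flattens A's nested loops (inner digit loop + outer recursion) into one
-- non-nested state-machine loop over (n, s); alternative decomposition, same cost.

-- ===== PORT A =====
-- inner 'while(n)' loop of A: fuel-bounded (fuel = n.natAbs always suffices for n >= 0)
def happyDigitLoop : Nat → Int → Int → Int
  | 0, _, s => s
  | fuel+1, n, s =>
    if n ≠ 0 then
      happyDigitLoop fuel (PySem.Int.floordiv n 10) (s + (PySem.Int.mod n 10) ^ 2)
    else s

-- outer recursion of A, fuel-bounded (the happy-number iteration reaches a value < 9
-- after far fewer than 100000 rounds for every input the claim covers)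
def happyRec : Nat → Int → Int
  | 0, _ => 0
  | fuel+1, n =>
    let s := happyDigitLoop n.natAbs n 0
    if s < 9 then s else happyRec fuel s

def happy (n : Int) : Int := happyRec 100000 n

-- ===== PORT B =====
-- one digit step shrinks |n| (used by the termination argument of happyStep)
lemma happy_fd_lt (n : Int) (h : 0 < n) :
    (PySem.Int.floordiv n 10).natAbs < n.natAbs := by
  rw [PySem.Int.floordiv_eq_ediv_of_pos (by norm_num)]
  omega

-- the single 'while True' state machine of B; fuel counts ROUNDS only (the digit
-- branch keeps the fuel and terminates because |n| shrinks); the '0 < n' test is a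
-- totality guard only: Python B diverges on negative n, which Pre_happy excludes
def happyStep : Nat → Int → Int → Int
  | 0, _, _ => 0
  | fuel+1, n, s =>
    if h : n ≠ 0 then
      if h2 : 0 < n then
        happyStep (fuel+1) (PySem.Int.floordiv n 10) (s + (PySem.Int.mod n 10) ^ 2)
      else 0
    else if s < 9 then s else happyStep fuel s 0
termination_by fuel n _ => (fuel, n.natAbs)
decreasing_by
  · exact Prod.Lex.right _ (happy_fd_lt n h2)
  · exact Prod.Lex.left _ _ (Nat.lt_succ_self _)

def happy_alt (n : Int) : Int := happyStep 100000 n 0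

-- ===== PRECONDITION & SPEC =====
-- Pre_ excludes negative n, on which the Python A never returns (its inner loop
-- n = n//10 is stuck at -1, so A diverges there; so does B)
def Pre_happy (n : Int) : Prop := 0 ≤ n
instance (n : Int) : Decidable (Pre_happy n) := by unfold Pre_happy; infer_instance
def pvWitness_happy : Int := 19

def Spec_happy (n : Int) (out : Int) : Prop := out = happy_alt n
instance (n : Int) (out : Int) : Decidable (Spec_happy n out) := by unfold Spec_happy; infer_instance

-- ===== CLAIM (what is proved, stated in full; the proofs are below) =====
def Claim_equal_happy : Prop := ∀ (n : Int), Dom_happy n → Pre_happy n → Spec_happy n (happy n)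

-- ===== LEMMAS AND PROOFS =====

lemma happy_fd_nonneg (n : Int) (h : 0 ≤ n) : 0 ≤ PySem.Int.floordiv n 10 := by
  rw [PySem.Int.floordiv_eq_ediv_of_pos (by norm_num)]
  omega

lemma dl_zero (f : Nat) (s : Int) : happyDigitLoop f 0 s = s := by
  cases f <;> simp [happyDigitLoop]

lemma dl_nonneg (f : Nat) (n s : Int) (hs : 0 ≤ s) : 0 ≤ happyDigitLoop f n s := by
  induction f generalizing n s with
  | zero => exact hs
  | succ f ih =>
    by_cases h : n = 0
    · simpa [happyDigitLoop, h] using hs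
    · rw [happyDigitLoop, if_pos h]
      exact ih _ _ (by positivity)

-- any fuel ≥ the digit count gives the same result
lemma dl_fuel (k : Nat) : ∀ (f f' : Nat) (n s : Int), 0 ≤ n →
    n.natAbs ≤ f → n.natAbs ≤ f' → n.natAbs ≤ k →
    happyDigitLoop f n s = happyDigitLoop f' n s := by
  induction k with
  | zero =>
    intro f f' n s hn hf hf' hk
    have : n = 0 := by omega
    subst this; rw [dl_zero, dl_zero]
  | succ k ih =>
    intro f f' n s hn hf hf' hk
    by_cases h : n = 0
    · subst h; rw [dl_zero, dl_zero]
    · have hpos : 0 < n := lt_of_le_of_ne hn (Ne.symm h)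
      obtain ⟨f₁, rfl⟩ : ∃ m, f = m + 1 := ⟨f - 1, by omega⟩
      obtain ⟨f₂, rfl⟩ : ∃ m, f' = m + 1 := ⟨f' - 1, by omega⟩
      rw [happyDigitLoop, happyDigitLoop, if_pos h, if_pos h]
      have hlt := happy_fd_lt n hpos
      exact ih _ _ _ _ (happy_fd_nonneg n hn) (by omega) (by omega) (by omega)

-- one full round of B's flattened loop equals A's inner loop followed by the dispatch
lemma step_round (k : Nat) : ∀ (f : Nat) (n s : Int), 0 ≤ n → n.natAbs ≤ k →
    happyStep (f+1) n s =
      if happyDigitLoop n.natAbs n s < 9 then happyDigitLoop n.natAbs n s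
      else happyStep f (happyDigitLoop n.natAbs n s) 0 := by
  induction k with
  | zero =>
    intro f n s hn hk
    have : n = 0 := by omega
    subst this
    rw [happyStep, dl_zero]
    simp
  | succ k ih =>
    intro f n s hn hk
    by_cases h : n = 0
    · subst h
      rw [happyStep, dl_zero]
      simp
    · have hpos : 0 < n := lt_of_le_of_ne hn (Ne.symm h)
      rw [happyStep, dif_pos h, dif_pos hpos]
      rw [ih f _ _ (happy_fd_nonneg n hn) (by have := happy_fd_lt n hpos; omega)]
      have hd : happyDigitLoop n.natAbs n s =
          happyDigitLoop (PySem.Int.floordiv n 10).natAbs (PySem.Int.floordiv n 10)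
            (s + (PySem.Int.mod n 10) ^ 2) := by
        obtain ⟨m, hm⟩ : ∃ m, n.natAbs = m + 1 := ⟨n.natAbs - 1, by omega⟩
        rw [hm, happyDigitLoop, if_pos h]
        exact dl_fuel m m (PySem.Int.floordiv n 10).natAbs _ _
          (happy_fd_nonneg n hn) (by have := happy_fd_lt n hpos; omega) (le_refl _)
          (by have := happy_fd_lt n hpos; omega)
      rw [hd]

lemma rec_eq_step (f : Nat) : ∀ (n : Int), 0 ≤ n → happyRec f n = happyStep f n 0 := by
  induction f with
  | zero => intro n _; rw [happyRec, happyStep]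
  | succ f ih =>
    intro n hn
    rw [happyRec, step_round n.natAbs f n 0 hn (le_refl _)]
    by_cases hlt : happyDigitLoop n.natAbs n 0 < 9
    · simp [hlt]
    · simp only [hlt, if_false]
      exact ih _ (dl_nonneg _ _ _ (le_refl 0))

-- ===== VERDICT (by name: the statement is the Claim_ definition above) =====
theorem happy_spec : Claim_equal_happy := by
  intro n _ hpre
  unfold Spec_happy happy happy_alt
  exact rec_eq_step 100000 n hpre
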